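-- pv_equiv track=rewrite | github.com/pypi-data/pypi-mirror-69 | packages/ISCNSNAKE/ISCNSNAKE-2.3.2-py3-none-any.whl/ISCNSNAKE/ISCNParser.py | make_filters
-- ===== SOURCE A (Python) =====
-- def make_filters(filters_string):
--     """
--     Takes filters from the main menu and turns them from strings to
--     dictionaries
--     Parameters:
--         filters: a list of strings
--     Returns:
--         dictionary in the format {column : [acceptable_item]}
--     """
--     filter_dict = {}
--     if filters_string == 'none' or filters_string == 'None':
--         return filter_dict
--     elif type(filters_string) == list:
--         for filter_item in filters_string:
--             filters = filter_item.split(':')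
--             try:
--                 filter_dict[filters[0]].append(filters[1])
--             except KeyError:
--                 filter_dict[filters[0]] = [filters[1]]
--         return filter_dict
--     else:
--         filters = filters_string.split('//')
--         for filter in filters:
--             filter_list = filter.split(':')
--             try:
--                 filter_dict[filter_list[0]].append(filter_list[1])
--             except KeyError:
--                 filter_dict[filter_list[0]] = [filter_list[1]]
--         return filter_dict
-- ===== SOURCE B (Python) =====
-- def make_filters(filters_string):
--     if filters_string == 'none' or filters_string == 'None':
--         return {}
--     tokens = filters_string if type(filters_string) == list else filters_string.split('//')
--     pairs = [t.split(':') for t in tokens]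
--     keys = list(dict.fromkeys(p[0] for p in pairs))
--     return {k: [p[1] for p in pairs if p[0] == k] for k in keys}
-- ===== Notes on version B (the rewrite author's own statement) =====
-- stated objective: alternative
-- what changed: A's incremental try/except-KeyError dict mutation loop (duplicated per branch) is replaced by a two-phase group-by: split all tokens into (key, value) pairs once, dedup the keys in first-occurrence order with dict.fromkeys, and build the result as a comprehension collecting each key's values by a filtered pass.
import Mathlib
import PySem

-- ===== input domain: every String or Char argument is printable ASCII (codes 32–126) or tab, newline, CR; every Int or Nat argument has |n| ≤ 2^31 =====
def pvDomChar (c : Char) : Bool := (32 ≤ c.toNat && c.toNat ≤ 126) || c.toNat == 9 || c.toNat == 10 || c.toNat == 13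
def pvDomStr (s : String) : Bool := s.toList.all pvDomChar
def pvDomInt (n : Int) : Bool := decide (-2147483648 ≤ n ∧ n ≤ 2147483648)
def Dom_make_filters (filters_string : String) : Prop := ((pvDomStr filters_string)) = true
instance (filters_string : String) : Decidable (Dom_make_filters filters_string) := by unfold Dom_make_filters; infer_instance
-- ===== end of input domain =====

-- B replaces A's incremental try/except dict loop by a two-phase group-by (split all tokens,
-- dedup the keys in first-occurrence order, collect each key's values by a filtered pass);
-- objective: simpler/alternative decomposition, same cost.

-- ===== PORT A =====
-- A's loop body: filters = filter.split(':'); try d[filters[0]].append(filters[1])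
-- except KeyError: d[filters[0]] = [filters[1]].  (filters[1] raises IndexError when the
-- token has no ':' — those inputs are excluded by Pre_; the port uses pyGetD … "" there.)
def make_filters_step (d : PySem.Dict String (List String)) (filter : String) :
    PySem.Dict String (List String) :=
  let filter_list := (PySem.Str.split? filter ":").getD []  -- ':' ≠ "" so split? is `some`
  let k := PySem.List.pyGetD filter_list 0 ""
  let v := PySem.List.pyGetD filter_list 1 ""
  match d.get? k with
  | some xs => d.insert k (xs ++ [v])   -- the try-branch: append in place
  | none    => d.insert k [v]           -- the except-KeyError branch: fresh singleton

def make_filters (filters_string : String) : List (String × List String) :=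
  if filters_string = "none" ∨ filters_string = "None" then []
  else
    -- (the `type(filters_string) == list` branch is unreachable: the argument is a str)
    let filters := (PySem.Str.split? filters_string "//").getD []
    (filters.foldl make_filters_step PySem.Dict.empty).items

-- ===== PORT B =====
def make_filters_alt (filters_string : String) : List (String × List String) :=
  if filters_string = "none" ∨ filters_string = "None" then []
  else
    let tokens := (PySem.Str.split? filters_string "//").getD []
    let pairs := tokens.map (fun t =>
      let p := (PySem.Str.split? t ":").getD []
      (PySem.List.pyGetD p 0 "", PySem.List.pyGetD p 1 ""))
    let keys := PySem.List.dedup (pairs.map (·.1))      -- dict.fromkeys: first occurrences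
    keys.map (fun k => (k, (pairs.filter (fun p => p.1 == k)).map (·.2)))

-- ===== PRECONDITION & SPEC =====
-- Pre_ excludes exactly the inputs on which Python A raises IndexError (a '//'-token with
-- no ':'); Python B raises there too.
def Pre_make_filters (filters_string : String) : Prop :=
  filters_string = "none" ∨ filters_string = "None" ∨
    ∀ t ∈ (PySem.Str.split? filters_string "//").getD [],
      2 ≤ ((PySem.Str.split? t ":").getD []).length
instance (filters_string : String) : Decidable (Pre_make_filters filters_string) := by
  unfold Pre_make_filters; infer_instance

def pvWitness_make_filters : String := "chrom:1//chrom:2//band:p"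

def Spec_make_filters (filters_string : String) (out : List (String × List String)) : Prop :=
  out = make_filters_alt filters_string
instance (filters_string : String) (out : List (String × List String)) :
    Decidable (Spec_make_filters filters_string out) := by
  unfold Spec_make_filters; infer_instance

-- ===== CLAIM (what is proved, stated in full; the proofs are below) =====
def Claim_equal_make_filters : Prop := ∀ (filters_string : String), Dom_make_filters filters_string → Pre_make_filters filters_string → Spec_make_filters filters_string (make_filters filters_string)

-- ===== LEMMAS AND PROOFS =====

-- A's try/except step is exactly `d[k] = d.get(k, []) + [v]`, i.e. Dict.modify.
theorem make_filters_step_eq_modify (d : PySem.Dict String (List String)) (t : String) :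
    make_filters_step d t =
      d.modify (PySem.List.pyGetD ((PySem.Str.split? t ":").getD []) 0 "") []
        (· ++ [PySem.List.pyGetD ((PySem.Str.split? t ":").getD []) 1 ""]) := by
  unfold make_filters_step PySem.Dict.modify
  cases h : d.get? (PySem.List.pyGetD ((PySem.Str.split? t ":").getD []) 0 "") with
  | none => simp [h, PySem.Dict.getD_eq_get?_getD]
  | some xs => simp [h, PySem.Dict.getD_eq_get?_getD]

theorem make_filters_spec' (s : String) :
    make_filters s = make_filters_alt s := by
  unfold make_filters make_filters_alt
  by_cases hn : s = "none" ∨ s = "None"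
  · simp [hn]
  · simp only [hn, if_false]
    set tokens := (PySem.Str.split? s "//").getD [] with htok
    set pf : String → String × String := fun t =>
      (PySem.List.pyGetD ((PySem.Str.split? t ":").getD []) 0 "",
       PySem.List.pyGetD ((PySem.Str.split? t ":").getD []) 1 "") with hpf
    -- rewrite A's fold as a modify-fold over the (key, value) pairs
    have hstep : tokens.foldl make_filters_step PySem.Dict.empty
        = (tokens.map pf).foldl (fun d p => d.modify p.1 [] (· ++ [p.2])) PySem.Dict.empty := by
      rw [List.foldl_map]
      exact PySem.List.foldl_congr_mem tokens _ _ _ (fun d t _ => by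
        rw [make_filters_step_eq_modify])
    rw [hstep]
    set pairs := tokens.map pf with hpairs
    have hnd : ((pairs.foldl (fun d p => d.modify p.1 [] (· ++ [p.2]))
        PySem.Dict.empty)).keys.Nodup := by
      exact PySem.Dict.nodup_keys_foldl_modify_key pairs Prod.fst []
        (fun _ p => (· ++ [p.2])) PySem.Dict.empty (by simp)
    rw [PySem.Dict.items_eq_map_keys _ hnd []]
    have hkeys : (pairs.foldl (fun d p => d.modify p.1 [] (· ++ [p.2]))
        PySem.Dict.empty).keys = PySem.List.dedup (pairs.map (·.1)) := by
      rw [PySem.Dict.keys_foldl_modify_key pairs Prod.fst []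
        (fun _ p => (· ++ [p.2])) PySem.Dict.empty]
      rfl
    rw [hkeys]
    refine List.map_congr_left (fun k _ => ?_)
    rw [PySem.Dict.getD_foldl_modify_append pairs PySem.Dict.empty k]
    simp

-- ===== VERDICT (by name: the statement is the Claim_ definition above) =====
theorem make_filters_spec : Claim_equal_make_filters := by
  intro s _ _
  unfold Spec_make_filters
  exact make_filters_spec' s
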